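-- pv_equiv track=rewrite | github.com/cobaltt7/python-exercises | 3 Python Programming Puzzles/74-76.py | seventySix
-- ===== SOURCE A (Python) =====
-- from math import floor
--
-- def seventySix(data):
--     """
--     Write a Python program to find the index of the largest prime in the list and the sum of its
--     digits.
--     """
--
--     def isPrime(number):
--         if number < 2:
--             return False
--         for i in range(2, floor(number / 2) + 1):
--             if number % i == 0:
--                 return False
--         return True
--
--     primes = filter(lambda entry: isPrime(entry[1]), enumerate(data))
--     largest = sorted(primes, reverse=True, key=lambda entry: entry[1])[0]
--     return [largest[0], sum(map(int, str(largest[1])))]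
-- ===== SOURCE B (Python) =====
-- from math import isqrt
--
-- def seventySix(data):
--     """
--     Index of the largest prime in the list and the sum of its digits.
--     Single left-to-right scan keeping the best (index, value) so far;
--     primality by trial division up to isqrt(n), odd divisors only;
--     digit sum by arithmetic (divmod by 10) instead of str().
--     """
--
--     def is_prime(n):
--         if n < 2:
--             return False
--         if n < 4:
--             return True
--         if n % 2 == 0:
--             return False
--         for i in range(3, isqrt(n) + 1, 2):
--             if n % i == 0:
--                 return False
--         return True
--
--     best_i, best_v = -1, -1
--     for i, v in enumerate(data):
--         if v > best_v and is_prime(v):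
--             best_i, best_v = i, v
--     s, n = 0, best_v
--     while n > 0:
--         s += n % 10
--         n //= 10
--     return [best_i, s]
-- ===== Notes on version B (the rewrite author's own statement) =====
-- stated objective: faster
-- what changed: Replaces the filter-then-stable-sort argmax with a single running-max scan and replaces trial division up to n/2 with odd trial division up to isqrt(n) (plus an arithmetic digit sum instead of str()).
-- outside the precondition, e.g. on seventySix([0]): A raises IndexError, B returns [-1, 0]
import Mathlib
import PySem

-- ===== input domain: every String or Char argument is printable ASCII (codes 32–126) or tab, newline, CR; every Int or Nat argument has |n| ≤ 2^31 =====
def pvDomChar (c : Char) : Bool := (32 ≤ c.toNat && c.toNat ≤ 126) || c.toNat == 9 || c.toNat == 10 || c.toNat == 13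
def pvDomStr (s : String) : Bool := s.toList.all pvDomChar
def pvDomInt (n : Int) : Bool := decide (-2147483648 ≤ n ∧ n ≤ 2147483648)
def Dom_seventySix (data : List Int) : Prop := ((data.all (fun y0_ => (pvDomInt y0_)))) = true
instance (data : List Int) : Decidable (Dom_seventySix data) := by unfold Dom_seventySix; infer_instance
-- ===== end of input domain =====

-- B: single running-max scan + trial division to isqrt(n) (odd divisors) + arithmetic digit sum,
-- instead of A's filter + stable sort + trial division to n/2 + str()-based digit sum (faster).


-- ===== PORT A =====
-- isPrime: 'for i in range(2, floor(number/2)+1): if number % i == 0: return False' — the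
-- early-return loop is the 'all' of its test; floor(number/2) = number // 2 exactly on Dom (|n| ≤ 2^31 < 2^53).
def pvIsPrimeA (number : Int) : Bool :=
  if number < 2 then false
  else (PySem.List.pyRange 2 (PySem.Int.floordiv number 2 + 1) 1).all
    (fun i => !(PySem.Int.mod number i == 0))

-- sum(map(int, str(v))): int of a single digit char c is c.toNat - 48 (exact: v here passed the
-- prime filter, so v ≥ 2 and str(v) is all digits).
def pvCharSumA (v : Int) : Int :=
  ((PySem.Int.toChars v).map (fun c => ((c.toNat : Int) - 48))).sum

def seventySix (data : List Int) : List Int :=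
  let primes := (PySem.List.enumerate data).filter (fun e => pvIsPrimeA e.2)
  match (PySem.List.sorted primes (fun e => e.2) true).head? with
  | some largest => [largest.1, pvCharSumA largest.2]
  | none => []   -- sorted(primes)[0] raises IndexError; excluded by Pre_

-- ===== PORT B =====
def pvTrialOddB (n : Int) : Bool :=
  (PySem.List.pyRange 3 ((Nat.sqrt n.toNat : Int) + 1) 2).all
    (fun i => !(PySem.Int.mod n i == 0))

-- math.isqrt(n) = Nat.sqrt n.toNat, exact: this branch is reached only for n ≥ 4.
def pvIsPrimeB (n : Int) : Bool :=
  if n < 2 then false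
  else if n < 4 then true
  else if PySem.Int.mod n 2 == 0 then false
  else pvTrialOddB n

-- 'while n > 0: s += n % 10; n //= 10' — fuel n.toNat only guards termination (n strictly
-- decreases each pass), the computation is the loop's.
def pvDigitAux : Nat → Int → Int → Int
  | 0, s, _ => s
  | f + 1, s, n =>
    if 0 < n then pvDigitAux f (s + PySem.Int.mod n 10) (PySem.Int.floordiv n 10) else s

def pvDigitLoopB (s n : Int) : Int := pvDigitAux n.toNat s n

def seventySix_alt (data : List Int) : List Int :=
  let best := (PySem.List.enumerate data).foldl
    (fun b e => if e.2 > b.2 && pvIsPrimeB e.2 then e else b) ((-1 : Int), (-1 : Int))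
  [best.1, pvDigitLoopB 0 best.2]

-- ===== PRECONDITION & SPEC =====
-- Pre_ excludes exactly the lists with no prime element: there sorted(primes)[0] in A raises IndexError.
def Pre_seventySix (data : List Int) : Prop := ∃ x ∈ data, 2 ≤ x ∧ Nat.Prime x.toNat
instance (data : List Int) : Decidable (Pre_seventySix data) := by unfold Pre_seventySix; infer_instance
def pvWitness_seventySix : List Int := [10, 7, 4]

def Spec_seventySix (data : List Int) (out : List Int) : Prop := out = seventySix_alt data
instance (data : List Int) (out : List Int) : Decidable (Spec_seventySix data out) := by unfold Spec_seventySix; infer_instance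

-- ===== CLAIM (what is proved, stated in full; the proofs are below) =====
def Claim_equal_seventySix : Prop := ∀ (data : List Int), Dom_seventySix data → Pre_seventySix data → Spec_seventySix data (seventySix data)

-- ===== LEMMAS AND PROOFS =====

-- A's isPrime returns true exactly on the primes (as integers ≥ 2).
theorem pvIsPrimeA_iff (n : Int) : pvIsPrimeA n = true ↔ 2 ≤ n ∧ Nat.Prime n.toNat := by
  unfold pvIsPrimeA
  by_cases h2 : n < 2
  · simp [h2]
  · push_neg at h2
    simp only [if_neg (not_lt.mpr h2), List.all_eq_true, PySem.List.mem_pyRange_one]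
    obtain ⟨m, rfl⟩ : ∃ m : Nat, n = (m : Int) := ⟨n.toNat, by omega⟩
    have hm2 : 2 ≤ m := by exact_mod_cast h2
    rw [Int.toNat_natCast]
    constructor
    · intro hall
      refine ⟨h2, Nat.prime_def_lt'.mpr ⟨hm2, ?_⟩⟩
      intro k hk2 hkm hdvd
      obtain ⟨t, ht⟩ := hdvd
      have ht2 : 2 ≤ t := by nlinarith
      have hk : (k : Int) ≤ PySem.Int.floordiv (m : Int) 2 := by
        rw [PySem.Int.floordiv_eq_ediv_of_pos (by omega)]
        have : 2 * k ≤ m := by nlinarith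
        omega
      have := hall (k : Int) ⟨by exact_mod_cast hk2, by omega⟩
      simp only [Bool.not_eq_eq_eq_not, Bool.not_true, beq_eq_false_iff_ne] at this
      exact this (by rw [PySem.Int.mod_eq_zero_iff_dvd]; exact_mod_cast Dvd.intro t (by omega))
    · rintro ⟨-, hp⟩ i ⟨hi2, hiub⟩
      simp only [Bool.not_eq_eq_eq_not, Bool.not_true, beq_eq_false_iff_ne]
      intro hdvd
      rw [PySem.Int.mod_eq_zero_iff_dvd] at hdvd
      obtain ⟨k, rfl⟩ : ∃ k : Nat, i = (k : Int) := ⟨i.toNat, by omega⟩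
      rw [PySem.Int.floordiv_eq_ediv_of_pos (by omega)] at hiub
      have hkm : k < m := by omega
      exact Nat.prime_def_lt'.mp hp |>.2 k (by exact_mod_cast hi2) hkm (by exact_mod_cast hdvd)

-- B's is_prime returns true exactly on the primes (as integers ≥ 2).
theorem pvIsPrimeB_iff (n : Int) : pvIsPrimeB n = true ↔ 2 ≤ n ∧ Nat.Prime n.toNat := by
  unfold pvIsPrimeB
  by_cases h2 : n < 2
  · simp [h2]
  · push_neg at h2
    rw [if_neg (not_lt.mpr h2)]
    obtain ⟨m, rfl⟩ : ∃ m : Nat, n = (m : Int) := ⟨n.toNat, by omega⟩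
    have hm2 : 2 ≤ m := by exact_mod_cast h2
    by_cases h4 : (m : Int) < 4
    · have hm : m = 2 ∨ m = 3 := by omega
      rw [if_pos h4, Int.toNat_natCast]
      rcases hm with rfl | rfl
      · simpa using Nat.prime_two
      · simpa using Nat.prime_three
    · push_neg at h4
      rw [if_neg (not_lt.mpr h4), Int.toNat_natCast]
      have hm4 : 4 ≤ m := by exact_mod_cast h4
      by_cases hev : PySem.Int.mod (m : Int) 2 = 0
      · rw [if_pos (beq_iff_eq.mpr hev)]
        rw [PySem.Int.mod_eq_zero_iff_dvd] at hev
        have h2m : (2:Nat) ∣ m := by exact_mod_cast hev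
        constructor
        · intro h; cases h
        · rintro ⟨-, hp⟩
          rcases Nat.Prime.eq_one_or_self_of_dvd hp 2 h2m with h21 | h21 <;> omega
      · rw [if_neg (by simpa using hev)]
        rw [PySem.Int.mod_eq_zero_iff_dvd] at hev
        have hodd : ¬ ((2:Nat) ∣ m) := by exact_mod_cast hev
        unfold pvTrialOddB
        simp only [List.all_eq_true, Int.toNat_natCast]
        constructor
        · intro hall
          refine ⟨h2, ?_⟩
          by_contra hnp
          have hpp : m.minFac.Prime := Nat.minFac_prime (by omega)
          have hpdvd : m.minFac ∣ m := Nat.minFac_dvd m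
          have hsq : m.minFac ^ 2 ≤ m := Nat.minFac_sq_le_self (by omega) hnp
          have hple : m.minFac ≤ Nat.sqrt m := by rw [Nat.le_sqrt]; nlinarith
          have hp2 : m.minFac ≠ 2 := fun h => hodd (h ▸ hpdvd)
          have hp3 : 3 ≤ m.minFac := by have := hpp.two_le; omega
          have hpo : m.minFac % 2 = 1 := Nat.odd_iff.mp (hpp.odd_of_ne_two hp2)
          have hmem : (m.minFac : Int) ∈ PySem.List.pyRange 3 ((Nat.sqrt m : Int) + 1) 2 := by
            rw [PySem.List.mem_pyRange_iff_of_pos (by omega)]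
            refine ⟨by exact_mod_cast hp3,
              by exact_mod_cast (by omega : (m.minFac:Int) < (Nat.sqrt m : Int) + 1), ?_⟩
            have hco : (m.minFac : Int) % 2 = 1 := by omega
            omega
          have := hall _ hmem
          simp only [Bool.not_eq_eq_eq_not, Bool.not_true, beq_eq_false_iff_ne] at this
          exact this (by rw [PySem.Int.mod_eq_zero_iff_dvd]; exact_mod_cast hpdvd)
        · rintro ⟨-, hp⟩ i hi
          rw [PySem.List.mem_pyRange_iff_of_pos (by omega)] at hi
          obtain ⟨hi3, hiub, -⟩ := hi
          simp only [Bool.not_eq_eq_eq_not, Bool.not_true, beq_eq_false_iff_ne]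
          intro hdvd
          rw [PySem.Int.mod_eq_zero_iff_dvd] at hdvd
          obtain ⟨k, rfl⟩ : ∃ k : Nat, i = (k : Int) := ⟨i.toNat, by omega⟩
          have hks : k ≤ Nat.sqrt m := by omega
          exact (Nat.prime_def_le_sqrt.mp hp).2 k (by omega) hks (by exact_mod_cast hdvd)

theorem pvIsPrimeAB (n : Int) : pvIsPrimeA n = pvIsPrimeB n := by
  cases hA : pvIsPrimeA n with
  | true => exact ((pvIsPrimeB_iff n).mpr ((pvIsPrimeA_iff n).mp hA)).symm
  | false =>
    cases hB : pvIsPrimeB n with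
    | false => rfl
    | true => rw [(pvIsPrimeA_iff n).mpr ((pvIsPrimeB_iff n).mp hB)] at hA; cases hA

-- the running "best so far" step, as Python's sort-insertion sees it
def pvOptStep {α : Type} (bef : α → α → Bool) (h : Option α) (x : α) : Option α :=
  some (match h with | none => x | some y => if bef x y then x else y)

-- head of one stable insertion step
theorem head?_insertBy {α : Type} (bef : α → α → Bool) (x : α) (l : List α) :
    (PySem.List.insertBy bef x l).head? = pvOptStep bef l.head? x := by
  cases l with
  | nil => rfl
  | cons y ys =>
    simp only [PySem.List.insertBy, List.head?_cons]
    split <;> rename_i h <;> simp [pvOptStep, h]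

-- head of the insertion-sort fold is a running best-so-far fold
theorem head?_foldl_insertBy {α : Type} (bef : α → α → Bool) (l : List α) (acc : List α) :
    (l.foldl (fun acc x => PySem.List.insertBy bef x acc) acc).head? =
      l.foldl (pvOptStep bef) acc.head? := by
  induction l generalizing acc with
  | nil => rfl
  | cons x t ih =>
    simp only [List.foldl_cons]
    rw [ih, head?_insertBy]

-- the option-valued best-so-far fold, once started, is the plain best-so-far fold
theorem foldl_opt_some {α : Type} (bef : α → α → Bool) (l : List α) (b : α) :
    l.foldl (pvOptStep bef) (some b) = some (l.foldl (fun y x => if bef x y then x else y) b) := by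
  induction l generalizing b with
  | nil => rfl
  | cons x t ih =>
    simp only [List.foldl_cons]
    rw [show pvOptStep bef (some b) x = some (if bef x b then x else b) from rfl, ih]

-- the best-so-far fold returns its seed or a list element
theorem foldl_best_mem (l : List (Int × Int)) (b : Int × Int) :
    l.foldl (fun b x => if x.2 > b.2 then x else b) b = b ∨
      l.foldl (fun b x => if x.2 > b.2 then x else b) b ∈ l := by
  induction l generalizing b with
  | nil => left; rfl
  | cons x t ih =>
    simp only [List.foldl_cons]
    rcases ih (if x.2 > b.2 then x else b) with h | h
    · rw [h]
      by_cases hx : x.2 > b.2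
      · right; simp [hx]
      · left; simp [hx]
    · right; exact List.mem_cons_of_mem _ h

-- proof-side digit sum of a natural number
def pvNatDigitSum (m : Nat) : Nat :=
  if m < 10 then m else m % 10 + pvNatDigitSum (m / 10)
termination_by m
decreasing_by omega

theorem pvNatDigitSum_rec (m : Nat) : pvNatDigitSum m = m % 10 + pvNatDigitSum (m / 10) := by
  rw [pvNatDigitSum]
  by_cases h : m < 10
  · rw [if_pos h, pvNatDigitSum, if_pos (by omega)]
    omega
  · rw [if_neg h]

theorem pvDigitAux_eq (f : Nat) : ∀ (m : Nat) (s : Int), m ≤ f →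
    pvDigitAux f s (m : Int) = s + (pvNatDigitSum m : Int) := by
  induction f with
  | zero =>
    intro m s hm
    have h0 : m = 0 := by omega
    subst h0
    simp [pvDigitAux, pvNatDigitSum]
  | succ f ih =>
    intro m s hm
    by_cases h0 : m = 0
    · subst h0; simp [pvDigitAux, pvNatDigitSum]
    · have hpos : (0 : Int) < (m : Int) := by omega
      have hmod : PySem.Int.mod (m : Int) 10 = ((m % 10 : Nat) : Int) := by
        exact_mod_cast PySem.Int.mod_natCast m 10
      have hdiv : PySem.Int.floordiv (m : Int) 10 = ((m / 10 : Nat) : Int) := by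
        exact_mod_cast PySem.Int.floordiv_natCast m 10
      rw [pvDigitAux, if_pos hpos, hmod, hdiv, ih (m / 10) _ (by omega), pvNatDigitSum_rec m]
      push_cast
      ring

theorem pvDigitLoopB_eq (m : Nat) : pvDigitLoopB 0 (m : Int) = (pvNatDigitSum m : Int) := by
  unfold pvDigitLoopB
  rw [Int.toNat_natCast]
  simpa using pvDigitAux_eq m m 0 le_rfl

theorem digitChar_val (d : Nat) (hd : d < 10) : ((Nat.digitChar d).toNat : Int) - 48 = d := by
  interval_cases d <;> decide

theorem sum_toDigitsCore (f : Nat) : ∀ (n : Nat) (acc : List Char), n < 10 ^ f →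
    ((Nat.toDigitsCore 10 f n acc).map (fun c => ((c.toNat : Int) - 48))).sum
      = (pvNatDigitSum n : Int) + (acc.map (fun c => ((c.toNat : Int) - 48))).sum := by
  induction f with
  | zero =>
    intro n acc h
    have h0 : n = 0 := by simpa using h
    subst h0
    simp [Nat.toDigitsCore, pvNatDigitSum]
  | succ f ih =>
    intro n acc h
    rw [Nat.toDigitsCore]
    by_cases h0 : n / 10 = 0
    · rw [if_pos h0]
      have hn : n < 10 := by omega
      simp only [List.map_cons, List.sum_cons, digitChar_val (n % 10) (by omega)]
      rw [pvNatDigitSum, if_pos hn]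
      omega
    · rw [if_neg h0]
      rw [ih (n / 10) _ (by
        have h10 : 10 * (n / 10) ≤ n := Nat.mul_div_le n 10
        have hpow : 10 ^ (f + 1) = 10 * 10 ^ f := by ring
        omega)]
      simp only [List.map_cons, List.sum_cons, digitChar_val (n % 10) (by omega)]
      rw [pvNatDigitSum_rec n]
      push_cast
      ring

theorem pvCharSum_eq_digitLoop (v : Int) (hv : 0 ≤ v) : pvCharSumA v = pvDigitLoopB 0 v := by
  obtain ⟨m, rfl⟩ : ∃ m : Nat, v = (m : Int) := ⟨v.toNat, by omega⟩
  unfold pvCharSumA PySem.Int.toChars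
  rw [if_neg (by omega), Int.toNat_natCast, pvDigitLoopB_eq]
  unfold Nat.toDigits
  rw [sum_toDigitsCore (m + 1) m [] (by
    calc m < 10 ^ m := Nat.lt_pow_self (by omega)
    _ ≤ 10 ^ (m + 1) := Nat.pow_le_pow_right (by omega) (by omega))]
  simp

-- ===== VERDICT (by name: the statement is the Claim_ definition above) =====
theorem seventySix_spec : Claim_equal_seventySix := by
  intro data _ hpre
  unfold Spec_seventySix
  -- the filtered list of (index, value) pairs with prime value is nonempty
  obtain ⟨p0, rest, hPcons⟩ : ∃ p0 rest,
      (PySem.List.enumerate data).filter (fun e => pvIsPrimeA e.2) = p0 :: rest := by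
    obtain ⟨x, hx, hx2, hxp⟩ := hpre
    have hxmap : x ∈ (PySem.List.enumerate data).map (·.2) := by
      rw [PySem.List.map_snd_enumerate]; exact hx
    obtain ⟨e, he, he2⟩ := List.mem_map.mp hxmap
    have heP : e ∈ (PySem.List.enumerate data).filter (fun e => pvIsPrimeA e.2) := by
      rw [List.mem_filter]
      exact ⟨he, (pvIsPrimeA_iff e.2).mpr (he2 ▸ ⟨hx2, hxp⟩)⟩
    cases hc : (PySem.List.enumerate data).filter (fun e => pvIsPrimeA e.2) with
    | nil => rw [hc] at heP; cases heP
    | cons a t => exact ⟨a, t, rfl⟩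
  have hmemP : ∀ q ∈ p0 :: rest, pvIsPrimeA q.2 = true := by
    intro q hq
    rw [← hPcons] at hq
    exact (List.mem_filter.mp hq).2
  have hq2 : 2 ≤ (rest.foldl (fun b x => if x.2 > b.2 then x else b) p0).2 := by
    have hqmem : rest.foldl (fun b x => if x.2 > b.2 then x else b) p0 ∈ p0 :: rest := by
      rcases foldl_best_mem rest p0 with h | h
      · rw [h]; exact List.mem_cons_self
      · exact List.mem_cons_of_mem _ h
    exact ((pvIsPrimeA_iff _).mp (hmemP _ hqmem)).1
  have hfun : (fun (y x : Int × Int) => if decide (y.2 < x.2) = true then x else y)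
      = (fun b x => if x.2 > b.2 then x else b) := by
    funext y x
    by_cases h : y.2 < x.2 <;> simp [h]
  -- A's head of the reverse-stable-sorted prime list is the best-so-far fold
  have hbestA :
      (PySem.List.sorted
          ((PySem.List.enumerate data).filter (fun e => pvIsPrimeA e.2)) (fun e => e.2) true).head?
        = some (rest.foldl (fun b x => if x.2 > b.2 then x else b) p0) := by
    rw [hPcons, PySem.List.sorted_rev_eq_foldl_insertBy, head?_foldl_insertBy]
    simp only [List.foldl_cons, List.head?_nil]
    rw [show pvOptStep (fun a b => decide ((fun e : Int × Int => e.2) b < (fun e : Int × Int => e.2) a)) none p0 = some p0 from rfl]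
    rw [foldl_opt_some]
    simp only [hfun]
  -- B's single scan over enumerate(data) is the same best-so-far fold
  have hbestB :
      (PySem.List.enumerate data).foldl
          (fun b e => if (decide (e.2 > b.2) && pvIsPrimeB e.2) = true then e else b)
          ((-1 : Int), (-1 : Int))
        = rest.foldl (fun b x => if x.2 > b.2 then x else b) p0 := by
    have hstep : (fun (b e : Int × Int) =>
          if (decide (e.2 > b.2) && pvIsPrimeB e.2) = true then e else b)
        = (fun b e => if pvIsPrimeB e.2 = true then (if e.2 > b.2 then e else b) else b) := by
      funext b e
      by_cases hp : pvIsPrimeB e.2 <;> by_cases hgt : e.2 > b.2 <;> simp [hp, hgt]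
    rw [hstep, PySem.List.foldl_if_eq_foldl_filter]
    rw [List.filter_congr (fun e _ => (pvIsPrimeAB e.2).symm), hPcons]
    simp only [List.foldl_cons]
    have hp02 : 2 ≤ p0.2 := ((pvIsPrimeA_iff p0.2).mp (hmemP p0 List.mem_cons_self)).1
    rw [if_pos (by omega : p0.2 > (-1 : Int))]
  simp only [seventySix, seventySix_alt, hbestA, hbestB]
  rw [pvCharSum_eq_digitLoop _ (by omega)]
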